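-- pv_equiv track=rewrite | github.com/amita4171/alphafold-app | viz.py | make_alignment_viz
-- ===== SOURCE A (Python) =====
-- _BLOSUM62_SIMILAR = {
--     "A": "AS", "R": "RKQ", "N": "NDS", "D": "DNE", "C": "C",
--     "Q": "QRK", "E": "EDZ", "G": "G", "H": "HNY", "I": "ILV",
--     "L": "LIM", "K": "KRQ", "M": "MLI", "F": "FYW", "P": "P",
--     "S": "STA", "T": "TS", "W": "WYF", "Y": "YFW", "V": "VIL",
-- }
--
-- def make_alignment_viz(alignment: dict) -> str:
--     aligned_a = alignment.get("aligned_a", "")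
--     aligned_b = alignment.get("aligned_b", "")
--     match_chars = []
--     for a, b in zip(aligned_a, aligned_b):
--         if a == "-" or b == "-":
--             match_chars.append(" ")
--         elif a == b:
--             match_chars.append("|")
--         elif b in _BLOSUM62_SIMILAR.get(a, ""):
--             match_chars.append(":")
--         else:
--             match_chars.append(".")
--     match_line = "".join(match_chars)
--     # Format in blocks of 60
--     lines: list[str] = []
--     block = 60
--     for i in range(0, len(aligned_a), block):
--         lines.append(f"Seq A  {aligned_a[i:i+block]}")
--         lines.append(f"       {match_line[i:i+block]}")
--         lines.append(f"Seq B  {aligned_b[i:i+block]}")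
--         lines.append("")
--     return "\n".join(lines)
-- ===== SOURCE B (Python) =====
-- _BLOSUM62_SIMILAR = {
--     "A": "AS", "R": "RKQ", "N": "NDS", "D": "DNE", "C": "C",
--     "Q": "QRK", "E": "EDZ", "G": "G", "H": "HNY", "I": "ILV",
--     "L": "LIM", "K": "KRQ", "M": "MLI", "F": "FYW", "P": "P",
--     "S": "STA", "T": "TS", "W": "WYF", "Y": "YFW", "V": "VIL",
-- }
--
-- # Similarity as a flat set of ordered pairs, derived once from the table.
-- _SIM_PAIRS = {(x, y) for x, ys in _BLOSUM62_SIMILAR.items() for y in ys}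
--
--
-- def _tick(a, b):
--     if a == "-" or b == "-":
--         return " "
--     if a == b:
--         return "|"
--     if (a, b) in _SIM_PAIRS:
--         return ":"
--     return "."
--
--
-- def make_alignment_viz(alignment: dict) -> str:
--     # Peel 60-char blocks off the front of both strings (no index arithmetic,
--     # no precomputed match line); each block becomes one ready-made chunk.
--     a_rem = alignment.get("aligned_a", "")
--     b_rem = alignment.get("aligned_b", "")
--     chunks = []
--     while a_rem:
--         a_blk, a_rem = a_rem[:60], a_rem[60:]
--         b_blk, b_rem = b_rem[:60], b_rem[60:]
--         tick = "".join(_tick(x, y) for x, y in zip(a_blk, b_blk))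
--         chunks.append("Seq A  " + a_blk + "\n       " + tick + "\nSeq B  " + b_blk + "\n")
--     return "\n".join(chunks)
-- ===== Notes on version B (the rewrite author's own statement) =====
-- stated objective: alternative
-- what changed: B replaces A's two staged passes (precompute a full match line, then an index loop over range(0,len,60) slicing three parallel strings) by peeling 60-char blocks off the front of the remaining strings in a while loop with no indices, emitting one ready-made multi-line chunk per block, with the similarity test done against a flat set of (a,b) pairs instead of dict lookup plus substring membership.
import Mathlib
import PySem

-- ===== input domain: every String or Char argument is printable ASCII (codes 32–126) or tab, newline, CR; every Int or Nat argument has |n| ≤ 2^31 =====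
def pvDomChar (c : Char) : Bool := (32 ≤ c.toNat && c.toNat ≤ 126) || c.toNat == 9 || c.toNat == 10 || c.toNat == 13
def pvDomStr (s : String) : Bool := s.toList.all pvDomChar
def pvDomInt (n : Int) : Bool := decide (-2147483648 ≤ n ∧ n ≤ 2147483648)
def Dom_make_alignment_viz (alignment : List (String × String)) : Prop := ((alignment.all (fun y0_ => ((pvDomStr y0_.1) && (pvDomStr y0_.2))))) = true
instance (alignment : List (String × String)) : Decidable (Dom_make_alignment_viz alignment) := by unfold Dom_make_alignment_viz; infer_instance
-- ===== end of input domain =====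

-- B replaces A's two staged passes (full match line, then an index loop over range(0,len,60))
-- by peeling 60-char blocks off the front of both strings, emitting one ready-made chunk per
-- block, with similarity tested against a flat set of (a,b) pairs instead of dict + substring.

-- ===== PORT A =====
def pvBlosum : PySem.Dict String String :=
  PySem.Dict.mk [("A","AS"),("R","RKQ"),("N","NDS"),("D","DNE"),("C","C"),
   ("Q","QRK"),("E","EDZ"),("G","G"),("H","HNY"),("I","ILV"),
   ("L","LIM"),("K","KRQ"),("M","MLI"),("F","FYW"),("P","P"),
   ("S","STA"),("T","TS"),("W","WYF"),("Y","YFW"),("V","VIL")]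

-- A's loop body over zip(aligned_a, aligned_b); 'b in dict.get(a, "")' is Str.isIn
def pvMatchChar (a b : Char) : Char :=
  if a = '-' ∨ b = '-' then ' '
  else if a = b then '|'
  else if PySem.Str.isIn (String.ofList [b]) (PySem.Dict.getD pvBlosum (String.ofList [a]) "") then ':'
  else '.'

def make_alignment_viz (alignment : List (String × String)) : String :=
  let aligned_a := PySem.Dict.getD ⟨alignment⟩ "aligned_a" ""
  let aligned_b := PySem.Dict.getD ⟨alignment⟩ "aligned_b" ""
  let match_chars := (aligned_a.toList.zip aligned_b.toList).foldl
    (fun acc p => acc ++ [pvMatchChar p.1 p.2]) []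
  let match_line := String.ofList match_chars
  let lines := (PySem.List.pyRange 0 (PySem.Str.len aligned_a) 60).foldl
    (fun ls i =>
      ls ++ ["Seq A  " ++ PySem.Str.slice aligned_a (some i) (some (i+60)),
             "       " ++ PySem.Str.slice match_line (some i) (some (i+60)),
             "Seq B  " ++ PySem.Str.slice aligned_b (some i) (some (i+60)),
             ""]) []
  PySem.Str.join "\n" lines

-- ===== PORT B =====
-- the items of _BLOSUM62_SIMILAR (the 1-char Python key strings represented as Char)
def pvSimTable : List (Char × String) :=
  [('A',"AS"),('R',"RKQ"),('N',"NDS"),('D',"DNE"),('C',"C"),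
   ('Q',"QRK"),('E',"EDZ"),('G',"G"),('H',"HNY"),('I',"ILV"),
   ('L',"LIM"),('K',"KRQ"),('M',"MLI"),('F',"FYW"),('P',"P"),
   ('S',"STA"),('T',"TS"),('W',"WYF"),('Y',"YFW"),('V',"VIL")]

-- _SIM_PAIRS = {(x, y) for x, ys in _BLOSUM62_SIMILAR.items() for y in ys}
def pvSimPairs : PySem.Set (Char × Char) :=
  PySem.Set.ofList (pvSimTable.flatMap (fun p => p.2.toList.map (fun y => (p.1, y))))

-- _tick(a, b)
def pvTick (a b : Char) : Char :=
  if a = '-' ∨ b = '-' then ' '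
  else if a = b then '|'
  else if PySem.Set.contains pvSimPairs (a, b) then ':'
  else '.'

-- one chunk: "Seq A  " + a_blk + "\n       " + tick + "\nSeq B  " + b_blk + "\n"
def pvChunk (a_blk b_blk : List Char) : String :=
  String.ofList ("Seq A  ".toList ++ a_blk ++ "\n       ".toList
    ++ (a_blk.zip b_blk).map (fun p => pvTick p.1 p.2)
    ++ "\nSeq B  ".toList ++ b_blk ++ ['\n'])

-- the while loop: peel 60 chars off the front of both remainders per iteration
def pvChunks (a b : List Char) : List String :=
  if h : a = [] then []
  else pvChunk (a.take 60) (b.take 60) :: pvChunks (a.drop 60) (b.drop 60)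
termination_by a.length
decreasing_by
  simp only [List.length_drop]
  have := List.length_pos_of_ne_nil h
  omega

def make_alignment_viz_alt (alignment : List (String × String)) : String :=
  let aligned_a := PySem.Dict.getD ⟨alignment⟩ "aligned_a" ""
  let aligned_b := PySem.Dict.getD ⟨alignment⟩ "aligned_b" ""
  PySem.Str.join "\n" (pvChunks aligned_a.toList aligned_b.toList)

-- ===== PRECONDITION & SPEC =====
def Spec_make_alignment_viz (alignment : List (String × String)) (out : String) : Prop := out = make_alignment_viz_alt alignment
instance (alignment : List (String × String)) (out : String) : Decidable (Spec_make_alignment_viz alignment out) := by unfold Spec_make_alignment_viz; infer_instance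

-- ===== CLAIM (what is proved, stated in full; the proofs are below) =====
def Claim_equal_make_alignment_viz : Prop := ∀ (alignment : List (String × String)), Dom_make_alignment_viz alignment → Spec_make_alignment_viz alignment (make_alignment_viz alignment)

-- ===== LEMMAS AND PROOFS =====
theorem isIn_single (c : Char) (s : String) :
    PySem.Str.isIn (String.ofList [c]) s = s.toList.contains c := by
  rw [Bool.eq_iff_iff, PySem.Str.isIn_iff_infix, List.contains_iff_mem]
  simp [List.singleton_infix_iff]

-- B's pair-set test agrees with A's dict-plus-substring test on every pair of chars
theorem cond_eq (a b : Char) :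
    PySem.Set.contains pvSimPairs (a, b)
      = PySem.Str.isIn (String.ofList [b]) (PySem.Dict.getD pvBlosum (String.ofList [a]) "") := by
  by_cases hA : a = 'A'
  · subst hA
    have hg : PySem.Dict.getD pvBlosum (String.ofList ['A']) "" = "AS" := by decide
    rw [hg, isIn_single, Bool.eq_iff_iff, PySem.Set.contains_iff, List.contains_iff_mem]
    simp [pvSimPairs, pvSimTable, PySem.Set.mem_ofList]
  by_cases hR : a = 'R'
  · subst hR
    have hg : PySem.Dict.getD pvBlosum (String.ofList ['R']) "" = "RKQ" := by decide
    rw [hg, isIn_single, Bool.eq_iff_iff, PySem.Set.contains_iff, List.contains_iff_mem]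
    simp [pvSimPairs, pvSimTable, PySem.Set.mem_ofList]
  by_cases hN : a = 'N'
  · subst hN
    have hg : PySem.Dict.getD pvBlosum (String.ofList ['N']) "" = "NDS" := by decide
    rw [hg, isIn_single, Bool.eq_iff_iff, PySem.Set.contains_iff, List.contains_iff_mem]
    simp [pvSimPairs, pvSimTable, PySem.Set.mem_ofList]
  by_cases hD : a = 'D'
  · subst hD
    have hg : PySem.Dict.getD pvBlosum (String.ofList ['D']) "" = "DNE" := by decide
    rw [hg, isIn_single, Bool.eq_iff_iff, PySem.Set.contains_iff, List.contains_iff_mem]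
    simp [pvSimPairs, pvSimTable, PySem.Set.mem_ofList]
  by_cases hC : a = 'C'
  · subst hC
    have hg : PySem.Dict.getD pvBlosum (String.ofList ['C']) "" = "C" := by decide
    rw [hg, isIn_single, Bool.eq_iff_iff, PySem.Set.contains_iff, List.contains_iff_mem]
    simp [pvSimPairs, pvSimTable, PySem.Set.mem_ofList]
  by_cases hQ : a = 'Q'
  · subst hQ
    have hg : PySem.Dict.getD pvBlosum (String.ofList ['Q']) "" = "QRK" := by decide
    rw [hg, isIn_single, Bool.eq_iff_iff, PySem.Set.contains_iff, List.contains_iff_mem]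
    simp [pvSimPairs, pvSimTable, PySem.Set.mem_ofList]
  by_cases hE : a = 'E'
  · subst hE
    have hg : PySem.Dict.getD pvBlosum (String.ofList ['E']) "" = "EDZ" := by decide
    rw [hg, isIn_single, Bool.eq_iff_iff, PySem.Set.contains_iff, List.contains_iff_mem]
    simp [pvSimPairs, pvSimTable, PySem.Set.mem_ofList]
  by_cases hG : a = 'G'
  · subst hG
    have hg : PySem.Dict.getD pvBlosum (String.ofList ['G']) "" = "G" := by decide
    rw [hg, isIn_single, Bool.eq_iff_iff, PySem.Set.contains_iff, List.contains_iff_mem]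
    simp [pvSimPairs, pvSimTable, PySem.Set.mem_ofList]
  by_cases hH : a = 'H'
  · subst hH
    have hg : PySem.Dict.getD pvBlosum (String.ofList ['H']) "" = "HNY" := by decide
    rw [hg, isIn_single, Bool.eq_iff_iff, PySem.Set.contains_iff, List.contains_iff_mem]
    simp [pvSimPairs, pvSimTable, PySem.Set.mem_ofList]
  by_cases hI : a = 'I'
  · subst hI
    have hg : PySem.Dict.getD pvBlosum (String.ofList ['I']) "" = "ILV" := by decide
    rw [hg, isIn_single, Bool.eq_iff_iff, PySem.Set.contains_iff, List.contains_iff_mem]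
    simp [pvSimPairs, pvSimTable, PySem.Set.mem_ofList]
  by_cases hL : a = 'L'
  · subst hL
    have hg : PySem.Dict.getD pvBlosum (String.ofList ['L']) "" = "LIM" := by decide
    rw [hg, isIn_single, Bool.eq_iff_iff, PySem.Set.contains_iff, List.contains_iff_mem]
    simp [pvSimPairs, pvSimTable, PySem.Set.mem_ofList]
  by_cases hK : a = 'K'
  · subst hK
    have hg : PySem.Dict.getD pvBlosum (String.ofList ['K']) "" = "KRQ" := by decide
    rw [hg, isIn_single, Bool.eq_iff_iff, PySem.Set.contains_iff, List.contains_iff_mem]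
    simp [pvSimPairs, pvSimTable, PySem.Set.mem_ofList]
  by_cases hM : a = 'M'
  · subst hM
    have hg : PySem.Dict.getD pvBlosum (String.ofList ['M']) "" = "MLI" := by decide
    rw [hg, isIn_single, Bool.eq_iff_iff, PySem.Set.contains_iff, List.contains_iff_mem]
    simp [pvSimPairs, pvSimTable, PySem.Set.mem_ofList]
  by_cases hF : a = 'F'
  · subst hF
    have hg : PySem.Dict.getD pvBlosum (String.ofList ['F']) "" = "FYW" := by decide
    rw [hg, isIn_single, Bool.eq_iff_iff, PySem.Set.contains_iff, List.contains_iff_mem]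
    simp [pvSimPairs, pvSimTable, PySem.Set.mem_ofList]
  by_cases hP : a = 'P'
  · subst hP
    have hg : PySem.Dict.getD pvBlosum (String.ofList ['P']) "" = "P" := by decide
    rw [hg, isIn_single, Bool.eq_iff_iff, PySem.Set.contains_iff, List.contains_iff_mem]
    simp [pvSimPairs, pvSimTable, PySem.Set.mem_ofList]
  by_cases hS : a = 'S'
  · subst hS
    have hg : PySem.Dict.getD pvBlosum (String.ofList ['S']) "" = "STA" := by decide
    rw [hg, isIn_single, Bool.eq_iff_iff, PySem.Set.contains_iff, List.contains_iff_mem]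
    simp [pvSimPairs, pvSimTable, PySem.Set.mem_ofList]
  by_cases hT : a = 'T'
  · subst hT
    have hg : PySem.Dict.getD pvBlosum (String.ofList ['T']) "" = "TS" := by decide
    rw [hg, isIn_single, Bool.eq_iff_iff, PySem.Set.contains_iff, List.contains_iff_mem]
    simp [pvSimPairs, pvSimTable, PySem.Set.mem_ofList]
  by_cases hW : a = 'W'
  · subst hW
    have hg : PySem.Dict.getD pvBlosum (String.ofList ['W']) "" = "WYF" := by decide
    rw [hg, isIn_single, Bool.eq_iff_iff, PySem.Set.contains_iff, List.contains_iff_mem]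
    simp [pvSimPairs, pvSimTable, PySem.Set.mem_ofList]
  by_cases hY : a = 'Y'
  · subst hY
    have hg : PySem.Dict.getD pvBlosum (String.ofList ['Y']) "" = "YFW" := by decide
    rw [hg, isIn_single, Bool.eq_iff_iff, PySem.Set.contains_iff, List.contains_iff_mem]
    simp [pvSimPairs, pvSimTable, PySem.Set.mem_ofList]
  by_cases hV : a = 'V'
  · subst hV
    have hg : PySem.Dict.getD pvBlosum (String.ofList ['V']) "" = "VIL" := by decide
    rw [hg, isIn_single, Bool.eq_iff_iff, PySem.Set.contains_iff, List.contains_iff_mem]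
    simp [pvSimPairs, pvSimTable, PySem.Set.mem_ofList]
  · have hg : PySem.Dict.getD pvBlosum (String.ofList [a]) "" = "" := by
      apply PySem.Dict.getD_of_not_contains
      rw [PySem.Dict.contains_eq_decide_mem_keys]
      simp only [pvBlosum, PySem.Dict.keys_mk, decide_eq_false_iff_not]
      intro hmem
      simp only [List.map_cons, List.map_nil, List.mem_cons, List.not_mem_nil, or_false] at hmem
      rcases hmem with h|h|h|h|h|h|h|h|h|h|h|h|h|h|h|h|h|h|h|h <;>
        (have h2 := congrArg String.toList h
         simp only [String.toList_ofList] at h2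
         first | exact hA (by rw [show String.toList "A" = ['A'] from rfl] at h2; injection h2) | exact hR (by rw [show String.toList "R" = ['R'] from rfl] at h2; injection h2) | exact hN (by rw [show String.toList "N" = ['N'] from rfl] at h2; injection h2) | exact hD (by rw [show String.toList "D" = ['D'] from rfl] at h2; injection h2) | exact hC (by rw [show String.toList "C" = ['C'] from rfl] at h2; injection h2) | exact hQ (by rw [show String.toList "Q" = ['Q'] from rfl] at h2; injection h2) | exact hE (by rw [show String.toList "E" = ['E'] from rfl] at h2; injection h2) | exact hG (by rw [show String.toList "G" = ['G'] from rfl] at h2; injection h2) | exact hH (by rw [show String.toList "H" = ['H'] from rfl] at h2; injection h2) | exact hI (by rw [show String.toList "I" = ['I'] from rfl] at h2; injection h2) | exact hL (by rw [show String.toList "L" = ['L'] from rfl] at h2; injection h2) | exact hK (by rw [show String.toList "K" = ['K'] from rfl] at h2; injection h2) | exact hM (by rw [show String.toList "M" = ['M'] from rfl] at h2; injection h2) | exact hF (by rw [show String.toList "F" = ['F'] from rfl] at h2; injection h2) | exact hP (by rw [show String.toList "P" = ['P'] from rfl] at h2; injection h2) | exact hS (by rw [show String.toList "S" = ['S'] from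 rfl] at h2; injection h2) | exact hT (by rw [show String.toList "T" = ['T'] from rfl] at h2; injection h2) | exact hW (by rw [show String.toList "W" = ['W'] from rfl] at h2; injection h2) | exact hY (by rw [show String.toList "Y" = ['Y'] from rfl] at h2; injection h2) | exact hV (by rw [show String.toList "V" = ['V'] from rfl] at h2; injection h2))
    rw [hg, isIn_single, Bool.eq_iff_iff, PySem.Set.contains_iff, List.contains_iff_mem]
    simp [pvSimPairs, pvSimTable, PySem.Set.mem_ofList]
    tauto

theorem tick_eq (a b : Char) : pvTick a b = pvMatchChar a b := by
  unfold pvTick pvMatchChar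
  rw [cond_eq]

-- A's block lines at offset i, at the List Char level
def pvLines (a b ml : List Char) (i : Int) : List (List Char) :=
  ["Seq A  ".toList ++ PySem.List.slice a (some i) (some (i+60)),
   "       ".toList ++ PySem.List.slice ml (some i) (some (i+60)),
   "Seq B  ".toList ++ PySem.List.slice b (some i) (some (i+60)),
   []]

def pvML (a b : List Char) : List Char := (a.zip b).map (fun p => pvMatchChar p.1 p.2)

theorem pvRange60 (n : Int) (hn : 0 < n) :
    PySem.List.pyRange 0 n 60 = 0 :: (PySem.List.pyRange 0 (n - 60) 60).map (· + 60) := by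
  rw [PySem.List.pyRange_of_pos _ _ (by norm_num : (0:Int) < 60),
      PySem.List.pyRange_of_pos _ _ (by norm_num : (0:Int) < 60)]
  by_cases h : n ≤ 60
  · rw [if_pos hn, if_neg (by omega), show ((n - 0 + 60 - 1) / 60).toNat = 1 from by omega]
    simp
  · rw [if_pos hn, if_pos (by omega : (0:Int) < n - 60),
        show ((n - 0 + 60 - 1) / 60).toNat = ((n - 60 - 0 + 60 - 1) / 60).toNat + 1 from by omega,
        List.range_succ_eq_map]
    simp only [List.map_cons, List.map_map]
    refine List.cons_eq_cons.mpr ⟨by norm_num, ?_⟩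
    apply List.map_congr_left
    intro k _
    simp only [Function.comp_apply, Nat.succ_eq_add_one]
    push_cast
    ring

theorem pv_slice_shift (x : List Char) (i : Int) (hi : 0 ≤ i) :
    PySem.List.slice x (some (i+60)) (some (i+60+60))
      = PySem.List.slice (x.drop 60) (some i) (some (i+60)) := by
  rw [PySem.List.slice_toNat _ (by omega) (by omega),
      PySem.List.slice_toNat _ (by omega) (by omega),
      List.drop_drop,
      show (i+60+60).toNat - (i+60).toNat = (i+60).toNat - i.toNat from by omega,
      show (60 : Nat) + i.toNat = (i+60).toNat from by omega]

theorem pv_ml_drop (a b : List Char) : (pvML a b).drop 60 = pvML (a.drop 60) (b.drop 60) := by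
  unfold pvML
  rw [← List.map_drop, List.zip_eq_zipWith, List.zip_eq_zipWith, List.drop_zipWith]

theorem pv_join_block (l1 l2 l3 c : List Char) (rest crest : List (List Char))
    (hc : c = l1 ++ '\n' :: l2 ++ '\n' :: l3 ++ ['\n'])
    (hiff : rest = [] ↔ crest = [])
    (hj : PySem.Chars.join ['\n'] rest = PySem.Chars.join ['\n'] crest) :
    PySem.Chars.join ['\n'] (l1 :: l2 :: l3 :: [] :: rest)
      = PySem.Chars.join ['\n'] (c :: crest) := by
  cases rest with
  | nil =>
    rw [hiff.mp rfl]
    simp [PySem.Chars.join_cons_cons, PySem.Chars.join_singleton, hc]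
  | cons r0 rs =>
    obtain ⟨c0, cs, rfl⟩ : ∃ c0 cs, crest = c0 :: cs := by
      cases crest with
      | nil => exact absurd (hiff.mpr rfl) (by simp)
      | cons c0 cs => exact ⟨c0, cs, rfl⟩
    simp only [PySem.Chars.join_cons_cons] at *
    simp [hc, hj]

theorem pv_range_zero : PySem.List.pyRange 0 0 60 = [] := by decide

theorem pv_range_bound (m : Nat) :
    PySem.List.pyRange 0 ((m : Int) - 60) 60 = PySem.List.pyRange 0 (((m - 60 : Nat) : Int)) 60 := by
  by_cases h : m ≤ 60
  · rw [PySem.List.pyRange_of_pos _ _ (by norm_num : (0:Int) < 60),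
        PySem.List.pyRange_of_pos _ _ (by norm_num : (0:Int) < 60),
        if_neg (by omega), if_neg (by omega)]
  · congr 1
    omega

theorem pv_rest_nil_iff (ad bd : List Char) :
    (PySem.List.pyRange 0 ((ad.length : Int)) 60).flatMap (fun i => pvLines ad bd (pvML ad bd) i) = []
      ↔ (pvChunks ad bd).map String.toList = [] := by
  by_cases hd : ad = []
  · subst hd
    rw [pvChunks]
    simp [pv_range_zero]
  · have hl : (0:Int) < (ad.length : Int) := by
      have := List.length_pos_of_ne_nil hd
      omega
    rw [pvRange60 _ hl, pvChunks, dif_neg hd]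
    simp [pvLines]

theorem pv_main : ∀ (n : Nat) (a b : List Char), a.length = n →
    PySem.Chars.join ['\n'] ((PySem.List.pyRange 0 (a.length : Int) 60).flatMap
      (fun i => (pvLines a b (pvML a b) i)))
    = PySem.Chars.join ['\n'] ((pvChunks a b).map String.toList) := by
  intro n
  induction n using Nat.strong_induction_on with
  | _ n ih =>
    intro a b hlen
    by_cases ha : a = []
    · subst ha
      rw [pvChunks]
      simp [pv_range_zero]
    · have hn : 0 < a.length := List.length_pos_of_ne_nil ha
      have hcast : (0:Int) < (a.length : Int) := by omega
      have hshift : ∀ i ∈ PySem.List.pyRange 0 ((a.length : Int) - 60) 60,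
          pvLines a b (pvML a b) (i + 60)
            = pvLines (a.drop 60) (b.drop 60) (pvML (a.drop 60) (b.drop 60)) i := by
        intro i hi
        have hi0 : (0:Int) ≤ i :=
          ((PySem.List.mem_pyRange_iff_of_pos (by norm_num) i).1 hi).1
        unfold pvLines
        rw [pv_slice_shift _ _ hi0, pv_slice_shift _ _ hi0, pv_slice_shift _ _ hi0, pv_ml_drop]
      rw [pvRange60 _ hcast, List.flatMap_cons, List.flatMap_map, List.flatMap_congr hshift,
          pv_range_bound a.length,
          show a.length - 60 = (a.drop 60).length from (List.length_drop).symm]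
      conv_rhs => rw [pvChunks, dif_neg ha]
      rw [List.map_cons]
      simp only [pvLines, List.cons_append, List.nil_append]
      apply pv_join_block
      · unfold pvChunk
        rw [String.toList_ofList]
        simp [PySem.List.slice_to _ (by norm_num : (0:Int) ≤ 60), pvML, tick_eq,
          show "\n       ".toList = '\n' :: "       ".toList from rfl,
          show "\nSeq B  ".toList = '\n' :: "Seq B  ".toList from rfl,
          List.append_assoc]
        rw [← List.map_take, List.zip_eq_zipWith, List.zip_eq_zipWith, List.take_zipWith]
      · exact pv_rest_nil_iff _ _
      · exact ih ((a.drop 60).length) (by simp; omega) (a.drop 60) (b.drop 60) rfl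

-- ===== VERDICT (by name: the statement is the Claim_ definition above) =====
set_option maxHeartbeats 1000000 in
theorem make_alignment_viz_spec : Claim_equal_make_alignment_viz := by
  intro alignment _
  unfold Spec_make_alignment_viz
  simp only [make_alignment_viz, make_alignment_viz_alt]
  apply String.toList_inj.mp
  rw [PySem.Str.toList_join, PySem.Str.toList_join,
      PySem.List.foldl_append_eq_flatMap]
  simp only [List.nil_append, List.map_flatMap, List.map_cons, List.map_nil,
    String.toList_append, PySem.Str.toList_slice, PySem.Chars.slice_eq_listSlice,
    String.toList_ofList, PySem.List.foldl_append_singleton_eq_map, PySem.Str.len_eq,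
    show ("\n").toList = ['\n'] from rfl,
    show ("" : String).toList = [] from rfl]
  have := pv_main ((PySem.Dict.getD (⟨alignment⟩ : PySem.Dict String String) "aligned_a" "").toList.length)
    (PySem.Dict.getD (⟨alignment⟩ : PySem.Dict String String) "aligned_a" "").toList
    (PySem.Dict.getD (⟨alignment⟩ : PySem.Dict String String) "aligned_b" "").toList rfl
  unfold pvLines pvML at this
  exact this
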